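-- pv_equiv track=rewrite | github.com/Seydifa/Troubleshooting-Agentic | src/tools/compute_track_b.py | merge_topology_graphs
-- ===== SOURCE A (Python) =====
-- from typing import Any, Dict, List, Optional, Tuple
--
-- def merge_topology_graphs(
--     graphs: List[Dict[str, List[Tuple[str, str, str]]]]
-- ) -> Dict[str, List[Tuple[str, str, str]]]:
--     """Merge multiple per-node topology graphs into one.
--
--     Duplicate edges (same local_port + remote_node + remote_port) are
--     deduplicated.
--     """
--     merged: Dict[str, List[Tuple[str, str, str]]] = {}
--     seen: set = set()
--     for g in graphs:
--         for node, links in g.items():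
--             merged.setdefault(node, [])
--             for link in links:
--                 key = (node,) + link
--                 if key not in seen:
--                     seen.add(key)
--                     merged[node].append(link)
--     return merged
-- ===== SOURCE B (Python) =====
-- from typing import Dict, List, Tuple
--
-- def merge_topology_graphs(
--     graphs: List[Dict[str, List[Tuple[str, str, str]]]]
-- ) -> Dict[str, List[Tuple[str, str, str]]]:
--     """Merge multiple per-node topology graphs into one, deduplicating edges.
--
--     Staged: flatten all (node, links) items, compute the first-seen node
--     order, then build each node's deduplicated link list by rescanning the
--     flat item list for that node."""
--     events = [(node, links) for g in graphs for node, links in g.items()]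
--     order: List[str] = []
--     for node, _ in events:
--         if node not in order:
--             order.append(node)
--     return {node: _collect_links(node, events) for node in order}
--
-- def _collect_links(node, events):
--     out = []
--     for n2, links in events:
--         if n2 == node:
--             for link in links:
--                 if link not in out:
--                     out.append(link)
--     return out
-- ===== Notes on version B (the rewrite author's own statement) =====
-- stated objective: alternative
-- what changed: Replaces A's single pass with a global 'seen' set of composite (node,)+link keys and incremental list appends by three staged passes: flatten all items, dedup the node order, then rebuild each node's deduplicated link list by rescanning the flat item list per node (no auxiliary set at all).
import Mathlib
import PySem

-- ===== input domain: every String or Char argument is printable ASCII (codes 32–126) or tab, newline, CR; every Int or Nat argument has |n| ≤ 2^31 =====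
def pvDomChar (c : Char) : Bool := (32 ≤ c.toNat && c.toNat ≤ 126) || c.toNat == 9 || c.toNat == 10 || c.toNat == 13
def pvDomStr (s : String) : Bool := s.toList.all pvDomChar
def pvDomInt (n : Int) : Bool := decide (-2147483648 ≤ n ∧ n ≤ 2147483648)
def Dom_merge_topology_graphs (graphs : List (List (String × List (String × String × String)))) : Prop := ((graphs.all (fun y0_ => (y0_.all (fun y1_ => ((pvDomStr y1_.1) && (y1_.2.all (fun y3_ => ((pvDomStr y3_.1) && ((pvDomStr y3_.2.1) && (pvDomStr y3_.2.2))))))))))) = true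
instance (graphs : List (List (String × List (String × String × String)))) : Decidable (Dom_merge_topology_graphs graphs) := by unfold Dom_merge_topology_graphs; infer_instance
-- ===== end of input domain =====

-- B replaces A's single pass (global 'seen' set of composite keys + incremental appends) by
-- three staged passes: flatten the items, dedup the node order, then rebuild each node's
-- deduplicated link list by rescanning the flat item list per node (alternative decomposition).

abbrev PVE := String × String × String

-- ===== PORT A =====
def merge_topology_graphs (graphs : List (List (String × List (String × String × String)))) : List (String × List (String × String × String)) :=
  let st :=
    graphs.foldl (fun st g =>
      g.foldl (fun st p =>
        let st := (st.1.setdefault p.1 [], st.2)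
        p.2.foldl (fun st link =>
          if st.2.contains (p.1, link) then st
          else (st.1.modify p.1 [] (· ++ [link]), st.2.add (p.1, link))) st) st)
      ((PySem.Dict.empty : PySem.Dict String (List (String × String × String))),
       (PySem.Set.empty : PySem.Set (String × (String × String × String))))
  st.1.items

-- ===== PORT B =====
-- helper _collect_links of Source B
def pvCollect (node : String) (events : List (String × List PVE)) : List PVE :=
  events.foldl (fun out p =>
    if p.1 == node then
      p.2.foldl (fun out link => if out.contains link then out else out ++ [link]) out
    else out) []

def merge_topology_graphs_alt (graphs : List (List (String × List (String × String × String)))) : List (String × List (String × String × String)) :=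
  let events := graphs.flatMap (fun g => g)
  let order := events.foldl (fun o p => if o.contains p.1 then o else o ++ [p.1]) []
  -- dict comprehension over 'order': its nodes are distinct, so the dict's items are exactly this map
  order.map (fun node => (node, pvCollect node events))

-- ===== PRECONDITION & SPEC =====
def Spec_merge_topology_graphs (graphs : List (List (String × List (String × String × String)))) (out : List (String × List (String × String × String))) : Prop := out = merge_topology_graphs_alt graphs
instance (graphs : List (List (String × List (String × String × String)))) (out : List (String × List (String × String × String))) : Decidable (Spec_merge_topology_graphs graphs out) := by unfold Spec_merge_topology_graphs; infer_instance

-- ===== CLAIM (what is proved, stated in full; the proofs are below) =====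
def Claim_equal_merge_topology_graphs : Prop := ∀ (graphs : List (List (String × List (String × String × String)))), Dom_merge_topology_graphs graphs → Spec_merge_topology_graphs graphs (merge_topology_graphs graphs)

-- ===== LEMMAS AND PROOFS =====

abbrev PVStA := PySem.Dict String (List PVE) × PySem.Set (String × PVE)

def pvOrd (events : List (String × List PVE)) : List String :=
  events.foldl (fun o p => if o.contains p.1 then o else o ++ [p.1]) []

def pvInnerA (node : String) (st : PVStA) (link : PVE) : PVStA :=
  if st.2.contains (node, link) then st
  else (st.1.modify node [] (· ++ [link]), st.2.add (node, link))

def pvStepA (st : PVStA) (p : String × List PVE) : PVStA :=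
  p.2.foldl (pvInnerA p.1) (st.1.setdefault p.1 [], st.2)

def pvMk (pre : List (String × List PVE)) : PySem.Dict String (List PVE) :=
  PySem.Dict.mk ((pvOrd pre).map (fun n => (n, pvCollect n pre)))

def pvInv (pre : List (String × List PVE)) (st : PVStA) : Prop :=
  st.1 = pvMk pre ∧ (∀ n l, st.2.contains (n, l) = (pvCollect n pre).contains l)

lemma pvA_eq (graphs : List (List (String × List PVE))) :
    merge_topology_graphs graphs =
      (graphs.flatten.foldl pvStepA (PySem.Dict.empty, PySem.Set.empty)).1.items := by
  rw [List.foldl_flatten]; rfl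

lemma pvB_eq (graphs : List (List (String × List PVE))) :
    merge_topology_graphs_alt graphs =
      (pvOrd graphs.flatten).map (fun n => (n, pvCollect n graphs.flatten)) := by
  have h : graphs.flatMap (fun g => g) = graphs.flatten := by
    simp [List.flatMap_def]
  show ((graphs.flatMap (fun g => g)).foldl (fun o p => if o.contains p.1 then o else o ++ [p.1]) []).map
      (fun node => (node, pvCollect node (graphs.flatMap (fun g => g)))) = _
  rw [h]; rfl

lemma pvSet_add_contains {α : Type} [BEq α] [LawfulBEq α] (s : PySem.Set α) (x y : α) :
    (PySem.Set.add s x).contains y = (s.contains y || y == x) := by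
  by_cases h : x ∈ s <;> by_cases hy : y = x <;>
    simp [PySem.Set.add, PySem.Set.contains, h, hy]

lemma pvSetList_contains {α : Type} [BEq α] [LawfulBEq α] (s : PySem.Set α) (x : α) :
    PySem.Set.contains s x = s.contains x := by
  simp [PySem.Set.contains]

lemma pvAdd_eq (s : List PVE) (x : PVE) :
    (if s.contains x then s else s ++ [x]) = PySem.Set.add s x := by
  by_cases h : x ∈ s <;> simp [PySem.Set.add, PySem.Set.contains, h]

lemma pvInsert_getD_self (d : PySem.Dict String (List PVE)) (k : String)
    (hnd : d.keys.Nodup) (h : d.contains k = true) :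
    d.insert k (d.getD k []) = d := by
  apply PySem.Dict.ext
  rw [PySem.Dict.items_insert_of_contains (h := h)]
  conv_rhs => rw [← List.map_id d.items]
  apply List.map_congr_left
  intro p hp
  by_cases hk : p.1 == k
  · have hk' : p.1 = k := by simpa using hk
    have : d.getD p.1 [] = p.2 :=
      PySem.Dict.getD_of_mem_items d (by simpa using hp) hnd []
    simp [← hk', this]
  · simp [hk]

lemma pvInnerA_spec (node : String) :
    ∀ (links : List PVE) (mA : PySem.Dict String (List PVE)) (seen : PySem.Set (String × PVE)),
    mA.contains node = true → mA.keys.Nodup →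
    (∀ n l, seen.contains (n, l) = (mA.getD n []).contains l) →
    links.foldl (pvInnerA node) (mA, seen)
      = (mA.insert node (links.foldl PySem.Set.add (mA.getD node [])),
         (links.foldl (pvInnerA node) (mA, seen)).2) ∧
    (∀ n l, (links.foldl (pvInnerA node) (mA, seen)).2.contains (n, l)
      = if n = node then (links.foldl PySem.Set.add (mA.getD node [])).contains l
        else seen.contains (n, l)) := by
  intro links
  induction links with
  | nil =>
    intro mA seen hc hnd hseen
    constructor
    · simp [pvInsert_getD_self mA node hnd hc]
    · intro n l
      simp only [List.foldl_nil]
      by_cases hn : n = node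
      · rw [if_pos hn, hseen, hn]
        exact (pvSetList_contains _ _).symm
      · rw [if_neg hn]
  | cons link ls ih =>
    intro mA seen hc hnd hseen
    by_cases h : seen.contains (node, link) = true
    · have hcur : (mA.getD node []).contains link = true := by rw [← hseen]; exact h
      have hadd : PySem.Set.add (mA.getD node []) link = mA.getD node [] := by
        have : link ∈ mA.getD node [] := by simpa using hcur
        simp [PySem.Set.add, PySem.Set.contains, this]
      have hid : pvInnerA node (mA, seen) link = (mA, seen) := by
        unfold pvInnerA; rw [h]; simp
      simp only [List.foldl_cons, hid, hadd]
      exact ih mA seen hc hnd hseen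
    · have h' : seen.contains (node, link) = false := by simpa using h
      have hcur : (mA.getD node []).contains link = false := by rw [← hseen]; exact h'
      have hmem : link ∉ mA.getD node [] := by simpa using hcur
      have hadd : PySem.Set.add (mA.getD node []) link = mA.getD node [] ++ [link] := by
        simp [PySem.Set.add, PySem.Set.contains, hmem]
      have hstep : pvInnerA node (mA, seen) link
          = (mA.insert node (mA.getD node [] ++ [link]), PySem.Set.add seen (node, link)) := by
        unfold pvInnerA; rw [h']
        simp only [Bool.false_eq_true, if_false]
        rfl
      set mA' := mA.insert node (mA.getD node [] ++ [link]) with hmA'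
      have hc' : mA'.contains node = true := PySem.Dict.contains_insert_self ..
      have hnd' : mA'.keys.Nodup := PySem.Dict.nodup_keys_insert mA node _ hnd
      have hgetD' : ∀ n, mA'.getD n [] = if n = node then mA.getD node [] ++ [link] else mA.getD n [] := by
        intro n; rw [hmA', PySem.Dict.getD_insert]
      have hseen' : ∀ n l, (PySem.Set.add seen (node, link)).contains (n, l) = (mA'.getD n []).contains l := by
        intro n l
        rw [pvSet_add_contains, hseen, hgetD' n]
        by_cases hn : n = node
        · subst hn
          rw [if_pos rfl]
          simp [Bool.beq_eq_decide_eq, Prod.ext_iff]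
        · have hbeq : (((n, l) : String × PVE) == (node, link)) = false := by
            simp only [beq_eq_false_iff_ne, ne_eq, Prod.mk.injEq, not_and]
            intro he _; exact absurd he hn
          rw [if_neg hn, hbeq, Bool.or_false]
      obtain ⟨ih1, ih2⟩ := ih mA' (PySem.Set.add seen (node, link)) hc' hnd' hseen'
      have hfst : (List.foldl (pvInnerA node) (mA, seen) (link :: ls)).1
          = mA.insert node (List.foldl PySem.Set.add (mA.getD node []) (link :: ls)) := by
        rw [List.foldl_cons, hstep, ih1]
        rw [hgetD' node, if_pos rfl]
        rw [List.foldl_cons, hadd, hmA', PySem.Dict.insert_insert_self]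
      constructor
      · exact Prod.ext hfst rfl
      · intro n l
        rw [List.foldl_cons, hstep, ih2 n l, hgetD' node, if_pos rfl]
        rw [List.foldl_cons, hadd]
        by_cases hn : n = node
        · simp [hn]
        · have hbeq : (((n, l) : String × PVE) == (node, link)) = false := by
            simp only [beq_eq_false_iff_ne, ne_eq, Prod.mk.injEq, not_and]
            intro he _; exact absurd he hn
          rw [if_neg hn, if_neg hn, pvSet_add_contains, hbeq, Bool.or_false]

-- ord fold: membership characterisation and nodup
lemma pvOrdF_mem : ∀ (events : List (String × List PVE)) (o : List String) (x : String),
    x ∈ events.foldl (fun o p => if o.contains p.1 then o else o ++ [p.1]) o ↔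
      x ∈ o ∨ x ∈ events.map Prod.fst := by
  intro events
  induction events with
  | nil => intro o x; simp
  | cons p ps ih =>
    intro o x
    simp only [List.foldl_cons, List.map_cons, List.mem_cons]
    by_cases h : o.contains p.1
    · have hp : p.1 ∈ o := by simpa using h
      rw [if_pos h, ih]
      constructor
      · tauto
      · rintro (h1 | h1 | h2)
        · exact Or.inl h1
        · exact Or.inl (h1 ▸ hp)
        · exact Or.inr h2
    · rw [if_neg h, ih]
      simp only [List.mem_append, List.mem_singleton]
      tauto

lemma pvOrdF_nodup : ∀ (events : List (String × List PVE)) (o : List String),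
    o.Nodup → (events.foldl (fun o p => if o.contains p.1 then o else o ++ [p.1]) o).Nodup := by
  intro events
  induction events with
  | nil => intro o h; exact h
  | cons p ps ih =>
    intro o h
    simp only [List.foldl_cons]
    by_cases hc : o.contains p.1
    · rw [if_pos hc]; exact ih o h
    · rw [if_neg hc]
      refine ih _ ?_
      have hni : p.1 ∉ o := by simpa using hc
      simp [List.nodup_append]
      exact ⟨h, fun a ha he => hni (he ▸ ha)⟩

lemma pvOrd_nodup (pre : List (String × List PVE)) : (pvOrd pre).Nodup :=
  pvOrdF_nodup pre [] List.nodup_nil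

lemma pvOrd_mem (pre : List (String × List PVE)) (x : String) :
    x ∈ pvOrd pre ↔ x ∈ pre.map Prod.fst := by
  rw [pvOrd, pvOrdF_mem]; simp

-- a node that never occurs collects nothing
lemma pvCollect_skipF : ∀ (events : List (String × List PVE)) (node : String) (out : List PVE),
    node ∉ events.map Prod.fst →
    events.foldl (fun out p =>
      if p.1 == node then
        p.2.foldl (fun out link => if out.contains link then out else out ++ [link]) out
      else out) out = out := by
  intro events
  induction events with
  | nil => intro node out _; rfl
  | cons p ps ih =>
    intro node out h
    simp only [List.map_cons, List.mem_cons, not_or] at h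
    obtain ⟨h1, h2⟩ := h
    have : (p.1 == node) = false := by simpa using (Ne.symm h1)
    simp only [List.foldl_cons, this, Bool.false_eq_true, if_false]
    exact ih node out h2

lemma pvCollect_skip (pre : List (String × List PVE)) (node : String)
    (h : node ∉ pre.map Prod.fst) : pvCollect node pre = [] :=
  pvCollect_skipF pre node [] h

-- get? of a map-built dict
lemma pvGet?Map : ∀ (l : List String) (f : String → List PVE) (k : String),
    (PySem.Dict.mk (l.map (fun n => (n, f n)))).get? k
      = if l.contains k then some (f k) else none := by
  intro l f
  induction l with
  | nil => intro k; rfl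
  | cons n ns ih =>
    intro k
    simp only [List.map_cons, PySem.Dict.get?_mk_cons, List.contains_cons]
    by_cases h : n == k
    · have : n = k := by simpa using h
      subst this; simp
    · have hne : n ≠ k := by simpa using h
      have hb1 : (n == k) = false := by simpa using hne
      have hb2 : (k == n) = false := by simpa using (Ne.symm hne)
      simp [hb1, hb2, ih]

lemma pvMk_getD (pre : List (String × List PVE)) (k : String) :
    (pvMk pre).getD k [] = pvCollect k pre := by
  rw [pvMk, PySem.Dict.getD_eq_get?_getD, pvGet?Map]
  by_cases h : (pvOrd pre).contains k
  · rw [if_pos h]; rfl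
  · rw [if_neg h]
    have : k ∉ pre.map Prod.fst := by
      rw [← pvOrd_mem]; simpa using h
    rw [pvCollect_skip pre k this]; rfl

lemma pvMk_contains (pre : List (String × List PVE)) (k : String) :
    (pvMk pre).contains k = (pvOrd pre).contains k := by
  rw [pvMk, PySem.Dict.contains_eq_isSome_get?, pvGet?Map]
  by_cases h : (pvOrd pre).contains k
  · rw [if_pos h, h]; rfl
  · have h' : (pvOrd pre).contains k = false := by simpa using h
    rw [if_neg h, h']; rfl

lemma pvMk_nodup (pre : List (String × List PVE)) : (pvMk pre).keys.Nodup := by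
  have : (pvMk pre).keys = pvOrd pre := by
    simp only [pvMk, PySem.Dict.keys]
    show ((pvOrd pre).map _).map Prod.fst = _
    rw [List.map_map]
    rw [show (Prod.fst ∘ fun n : String => (n, pvCollect n pre)) = id from rfl]
    exact List.map_id _
  rw [this]; exact pvOrd_nodup pre

lemma pvOrd_append (pre : List (String × List PVE)) (node : String) (links : List PVE) :
    pvOrd (pre ++ [(node, links)])
      = if (pvOrd pre).contains node then pvOrd pre else pvOrd pre ++ [node] := by
  simp [pvOrd, List.foldl_append]

lemma pvFoldAdd_eq (links : List PVE) : ∀ s : List PVE,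
    links.foldl (fun out link => if out.contains link then out else out ++ [link]) s
      = links.foldl PySem.Set.add s := by
  intro s
  simp only [pvAdd_eq]

lemma pvCollect_append (n node : String) (links : List PVE) (pre : List (String × List PVE)) :
    pvCollect n (pre ++ [(node, links)])
      = if node == n then links.foldl PySem.Set.add (pvCollect n pre) else pvCollect n pre := by
  rw [pvCollect, List.foldl_append, ← pvCollect]
  show (if (node == n) = true then
      links.foldl (fun out link => if out.contains link then out else out ++ [link]) (pvCollect n pre)
    else pvCollect n pre) = _
  by_cases h : (node == n) = true
  · rw [if_pos h, if_pos h]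
    exact pvFoldAdd_eq links (pvCollect n pre)
  · rw [if_neg h, if_neg h]

lemma pvStep_preserves (pre : List (String × List PVE)) (st : PVStA) (p : String × List PVE)
    (h : pvInv pre st) : pvInv (pre ++ [p]) (pvStepA st p) := by
  obtain ⟨node, links⟩ := p
  obtain ⟨h1, h2⟩ := h
  obtain ⟨mA0, seen⟩ := st
  simp only at h1 h2
  subst h1
  have hgetD : ∀ k, (pvMk pre).getD k [] = pvCollect k pre := pvMk_getD pre
  have hnd : (pvMk pre).keys.Nodup := pvMk_nodup pre
  have hseen : ∀ n l, seen.contains (n, l) = ((pvMk pre).getD n []).contains l := by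
    intro n l; rw [hgetD]; exact h2 n l
  -- the result of A's step, in both contains-cases, is fold over (mA', seen) with
  -- mA' containing node and mA'.getD n [] = pvCollect n pre
  by_cases hc : (pvMk pre).contains node = true
  · have hstep : pvStepA (pvMk pre, seen) (node, links)
        = links.foldl (pvInnerA node) (pvMk pre, seen) := by
      show links.foldl (pvInnerA node) ((pvMk pre).setdefault node [], seen) = _
      rw [PySem.Dict.setdefault_of_contains (pvMk pre) [] hc]
    obtain ⟨s1, s2⟩ := pvInnerA_spec node links (pvMk pre) seen hc hnd hseen
    have hL : links.foldl PySem.Set.add ((pvMk pre).getD node []) = pvCollect node (pre ++ [(node, links)]) := by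
      rw [pvCollect_append, if_pos (by simp), hgetD]
    constructor
    · show (pvStepA (pvMk pre, seen) (node, links)).1 = pvMk (pre ++ [(node, links)])
      rw [hstep, s1]
      show (pvMk pre).insert node _ = _
      apply PySem.Dict.ext
      have hcontains : (pvOrd pre).contains node := by rw [← pvMk_contains]; exact hc
      rw [PySem.Dict.items_insert_of_contains (h := hc)]
      show ((pvOrd pre).map (fun n => (n, pvCollect n pre))).map _ = (pvMk (pre ++ [(node, links)])).items
      have hord : pvOrd (pre ++ [(node, links)]) = pvOrd pre := by
        rw [pvOrd_append, if_pos hcontains]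
      show _ = (pvOrd (pre ++ [(node, links)])).map (fun n => (n, pvCollect n (pre ++ [(node, links)])))
      rw [hord, List.map_map]
      apply List.map_congr_left
      intro n _
      simp only [Function.comp]
      by_cases hn : n = node
      · subst hn
        simp only [BEq.rfl, if_pos]
        rw [hL]
      · have hb : (n == node) = false := by simpa using hn
        have hb' : (node == n) = false := by simpa using (Ne.symm hn)
        simp only [hb, Bool.false_eq_true, if_false, pvCollect_append, hb']
    · intro n l
      show (pvStepA (pvMk pre, seen) (node, links)).2.contains (n, l) = _
      rw [hstep, s2 n l]
      by_cases hn : n = node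
      · subst hn
        rw [if_pos rfl, hL]
        exact pvSetList_contains _ _
      · rw [if_neg hn, h2 n l, pvCollect_append]
        have hb' : (node == n) = false := by simpa using (Ne.symm hn)
        simp [hb']
  · have hc' : (pvMk pre).contains node = false := by simpa using hc
    have hsd : (pvMk pre).setdefault node [] = (pvMk pre).insert node [] :=
      PySem.Dict.setdefault_of_not_contains (pvMk pre) [] hc'
    set mA1 := (pvMk pre).insert node [] with hmA1
    have hc1 : mA1.contains node = true := PySem.Dict.contains_insert_self ..
    have hnd1 : mA1.keys.Nodup := PySem.Dict.nodup_keys_insert (pvMk pre) node _ hnd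
    have hgetD0 : (pvMk pre).getD node [] = [] := PySem.Dict.getD_of_not_contains (pvMk pre) [] hc'
    have hgetD1 : ∀ n, mA1.getD n [] = (pvMk pre).getD n [] := by
      intro n; rw [hmA1, PySem.Dict.getD_insert]
      by_cases hn : n = node
      · rw [if_pos hn, hn, hgetD0]
      · rw [if_neg hn]
    have hseen1 : ∀ n l, seen.contains (n, l) = (mA1.getD n []).contains l := by
      intro n l; rw [hgetD1]; exact hseen n l
    obtain ⟨s1, s2⟩ := pvInnerA_spec node links mA1 seen hc1 hnd1 hseen1
    have hstep : pvStepA (pvMk pre, seen) (node, links)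
        = links.foldl (pvInnerA node) (mA1, seen) := by
      show links.foldl (pvInnerA node) ((pvMk pre).setdefault node [], seen) = _
      rw [hsd]
    have hL : links.foldl PySem.Set.add (mA1.getD node []) = pvCollect node (pre ++ [(node, links)]) := by
      rw [pvCollect_append, if_pos (by simp), hgetD1, hgetD node]
    have hncont : (pvOrd pre).contains node = false := by
      rw [← pvMk_contains]; exact hc'
    have hnmem : node ∉ pvOrd pre := by simpa using hncont
    constructor
    · show (pvStepA (pvMk pre, seen) (node, links)).1 = pvMk (pre ++ [(node, links)])
      rw [hstep, s1]
      show mA1.insert node _ = _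
      rw [hmA1, PySem.Dict.insert_insert_self]
      apply PySem.Dict.ext
      rw [PySem.Dict.items_insert_of_not_contains (h := hc')]
      show (pvOrd pre).map (fun n => (n, pvCollect n pre)) ++ [(node, _)] = (pvMk (pre ++ [(node, links)])).items
      have hord : pvOrd (pre ++ [(node, links)]) = pvOrd pre ++ [node] := by
        rw [pvOrd_append, if_neg (by simpa using hnmem)]
      show _ = (pvOrd (pre ++ [(node, links)])).map (fun n => (n, pvCollect n (pre ++ [(node, links)])))
      rw [hord, List.map_append]
      congr 1
      · apply List.map_congr_left
        intro n hn
        have hne : n ≠ node := fun he => hnmem (he ▸ hn)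
        have hb' : (node == n) = false := by simpa using (Ne.symm hne)
        rw [pvCollect_append]
        simp [hb']
      · simp only [List.map_cons, List.map_nil]
        rw [← hL]
    · intro n l
      show (pvStepA (pvMk pre, seen) (node, links)).2.contains (n, l) = _
      rw [hstep, s2 n l]
      by_cases hn : n = node
      · subst hn
        rw [if_pos rfl, hL]
        exact pvSetList_contains _ _
      · rw [if_neg hn, h2 n l, pvCollect_append]
        have hb' : (node == n) = false := by simpa using (Ne.symm hn)
        simp [hb']

lemma pvMain : ∀ (suffix pre : List (String × List PVE)) (st : PVStA),
    pvInv pre st → pvInv (pre ++ suffix) (suffix.foldl pvStepA st) := by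
  intro suffix
  induction suffix with
  | nil => intro pre st h; simpa using h
  | cons p ps ih =>
    intro pre st h
    have := ih (pre ++ [p]) (pvStepA st p) (pvStep_preserves pre st p h)
    simpa [List.append_assoc] using this

lemma pvInv_init : pvInv [] ((PySem.Dict.empty : PySem.Dict String (List PVE)),
    (PySem.Set.empty : PySem.Set (String × PVE))) := by
  constructor
  · rfl
  · intro n l; rfl

theorem pv_final (graphs : List (List (String × List PVE))) :
    merge_topology_graphs graphs = merge_topology_graphs_alt graphs := by
  rw [pvA_eq, pvB_eq]
  have h := pvMain graphs.flatten [] _ pvInv_init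
  rw [List.nil_append] at h
  rw [h.1]
  rfl

-- ===== VERDICT (by name: the statement is the Claim_ definition above) =====
theorem merge_topology_graphs_spec : Claim_equal_merge_topology_graphs := by
  intro graphs _
  unfold Spec_merge_topology_graphs
  exact pv_final graphs
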